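-- pv_equiv track=rewrite | github.com/daniel-reich/ubiquitous-fiesta | hQRuQguN4bKyM2gik_18.py | simple_check
-- ===== SOURCE A (Python) =====
-- def simple_check(a, b):
--   if a > b:
--     larger = a
--     smaller = b
--   else:
--     larger = b
--     smaller = a
--   counter = 0
--   while smaller > 0:
--     if larger % smaller == 0:
--       counter +=1
--     larger -= 1
--     smaller -= 1
--   return counter
-- ===== SOURCE B (Python) =====
-- def simple_check(a, b):
--     m = a if a < b else b
--     if m <= 0:
--         return 0
--     d = a - b if a > b else b - a
--     if d == 0:
--         return m
--     c = 0
--     i = 1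
--     while i * i <= d:
--         if d % i == 0:
--             if i <= m:
--                 c += 1
--             j = d // i
--             if j != i and j <= m:
--                 c += 1
--         i += 1
--     return c
-- ===== Notes on version B (the rewrite author's own statement) =====
-- stated objective: faster
-- what changed: Instead of decrementing both numbers min(a,b) times, B observes larger%smaller==0 iff smaller divides the constant gap |a-b|, so it counts divisors of |a-b| that are <= min(a,b) by enumerating up to sqrt(|a-b|) (returning min(a,b) when a==b).
import Mathlib
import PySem

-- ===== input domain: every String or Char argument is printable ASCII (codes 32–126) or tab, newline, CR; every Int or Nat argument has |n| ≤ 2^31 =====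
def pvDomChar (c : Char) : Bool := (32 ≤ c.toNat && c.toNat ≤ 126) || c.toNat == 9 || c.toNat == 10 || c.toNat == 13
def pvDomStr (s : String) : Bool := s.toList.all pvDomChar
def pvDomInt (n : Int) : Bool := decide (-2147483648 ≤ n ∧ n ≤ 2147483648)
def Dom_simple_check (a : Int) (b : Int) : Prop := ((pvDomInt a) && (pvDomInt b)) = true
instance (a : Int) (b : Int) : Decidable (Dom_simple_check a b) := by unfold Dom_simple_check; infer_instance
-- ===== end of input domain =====

-- B replaces A's O(min(a,b)) double-decrement loop by counting divisors of |a-b|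
-- that are ≤ min(a,b) via √|a-b| enumeration (faster, asymptotic).

-- ===== PORT A =====
-- the while loop of A: state (larger, smaller, counter)
def simpleCheckLoopA (larger smaller counter : Int) : Int :=
  if h : smaller > 0 then
    simpleCheckLoopA (larger - 1) (smaller - 1)
      (if PySem.Int.mod larger smaller = 0 then counter + 1 else counter)
  else counter
termination_by smaller.toNat
decreasing_by omega

def simple_check (a : Int) (b : Int) : Int :=
  if a > b then simpleCheckLoopA a b 0 else simpleCheckLoopA b a 0

-- ===== PORT B =====
-- the while loop of B: i from 1 while i*i ≤ d
def simpleCheckLoopB (d m i c : Int) : Int :=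
  if h : i * i ≤ d then
    simpleCheckLoopB d m (i + 1)
      (if PySem.Int.mod d i = 0 then
        (let c1 := if i ≤ m then c + 1 else c
         let j := PySem.Int.floordiv d i
         if j ≠ i ∧ j ≤ m then c1 + 1 else c1)
       else c)
  else c
termination_by (d + 1 - i).toNat
decreasing_by
  have : i ≤ d := by nlinarith
  omega

def simple_check_alt (a : Int) (b : Int) : Int :=
  let m := if a < b then a else b
  if m ≤ 0 then 0
  else
    let d := if a > b then a - b else b - a
    if d = 0 then m
    else simpleCheckLoopB d m 1 0

-- ===== PRECONDITION & SPEC =====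
def Spec_simple_check (a : Int) (b : Int) (out : Int) : Prop := out = simple_check_alt a b
instance (a : Int) (b : Int) (out : Int) : Decidable (Spec_simple_check a b out) := by unfold Spec_simple_check; infer_instance

-- ===== CLAIM (what is proved, stated in full; the proofs are below) =====
def Claim_equal_simple_check : Prop := ∀ (a : Int) (b : Int), Dom_simple_check a b → Spec_simple_check a b (simple_check a b)

-- ===== LEMMAS AND PROOFS =====

-- the integers 1..s as a computable finset
def intRange1 (s : Int) : Finset Int :=
  (Finset.range s.toNat).map ⟨fun (j : Nat) => (j : Int) + 1, fun a b h => by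
    have h' : (a : Int) + 1 = (b : Int) + 1 := h
    omega⟩

lemma mem_intRange1 {s k : Int} : k ∈ intRange1 s ↔ 1 ≤ k ∧ k ≤ s := by
  simp only [intRange1, Finset.mem_map, Finset.mem_range, Function.Embedding.coeFn_mk]
  constructor
  · rintro ⟨j, hj, rfl⟩; omega
  · rintro ⟨h1, h2⟩; exact ⟨(k - 1).toNat, by omega, by omega⟩

-- the set of k ∈ [1, s] dividing d
def divsUpTo (d s : Int) : Finset Int := (intRange1 s).filter (fun k => PySem.Int.mod d k = 0)

lemma mem_divsUpTo {d s k : Int} : k ∈ divsUpTo d s ↔ (1 ≤ k ∧ k ≤ s) ∧ k ∣ d := by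
  simp [divsUpTo, Finset.mem_filter, mem_intRange1, PySem.Int.mod_eq_zero_iff_dvd]

lemma loopA_eq (s : Nat) : ∀ (d c : Int), 0 ≤ d →
    simpleCheckLoopA ((s : Int) + d) (s : Int) c = c + (divsUpTo d (s : Int)).card := by
  induction s with
  | zero =>
    intro d c _
    rw [simpleCheckLoopA]
    have : divsUpTo d 0 = ∅ := by
      rw [Finset.eq_empty_iff_forall_notMem]
      intro k hk
      rw [mem_divsUpTo] at hk
      omega
    simp [this]
  | succ n ih =>
    intro d c hd
    rw [simpleCheckLoopA]
    have hpos : ((n : Int) + 1) > 0 := by omega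
    simp only [show ((n+1 : Nat) : Int) = (n : Int) + 1 by push_cast; ring, dif_pos hpos]
    have harith : (n : Int) + 1 + d - 1 = (n : Int) + d := by ring
    have hmod : PySem.Int.mod ((n : Int) + 1 + d) ((n : Int) + 1) = 0 ↔ ((n : Int) + 1) ∣ d := by
      rw [PySem.Int.mod_eq_zero_iff_dvd]
      exact dvd_add_right (dvd_refl _)
    have hcard : (divsUpTo d ((n : Int) + 1)).card
        = (divsUpTo d (n : Int)).card + (if ((n : Int) + 1) ∣ d then 1 else 0) := by
      have hicc : divsUpTo d ((n : Int) + 1)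
          = if ((n : Int) + 1) ∣ d then insert ((n : Int) + 1) (divsUpTo d (n : Int)) else divsUpTo d (n : Int) := by
        split_ifs with hdvd
        · ext k
          rw [Finset.mem_insert, mem_divsUpTo, mem_divsUpTo]
          constructor
          · rintro ⟨⟨h1, h2⟩, h3⟩
            by_cases hk : k = (n : Int) + 1
            · exact Or.inl hk
            · exact Or.inr ⟨⟨h1, by omega⟩, h3⟩
          · rintro (rfl | ⟨⟨h1, h2⟩, h3⟩)
            · exact ⟨⟨by omega, le_refl _⟩, hdvd⟩
            · exact ⟨⟨h1, by omega⟩, h3⟩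
        · ext k
          rw [mem_divsUpTo, mem_divsUpTo]
          constructor
          · rintro ⟨⟨h1, h2⟩, h3⟩
            refine ⟨⟨h1, ?_⟩, h3⟩
            rcases lt_or_eq_of_le h2 with h | h
            · omega
            · exact absurd (h ▸ h3) hdvd
          · rintro ⟨⟨h1, h2⟩, h3⟩
            exact ⟨⟨h1, by omega⟩, h3⟩
      rw [hicc]
      split_ifs with hdvd
      · rw [Finset.card_insert_of_notMem (by rw [mem_divsUpTo]; rintro ⟨⟨_, h⟩, _⟩; omega)]
      · simp
    rw [show (n : Int) + 1 - 1 = (n : Int) by ring, harith]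
    split_ifs with hc
    · rw [ih d (c+1) hd, hcard, if_pos (hmod.mp hc)]; push_cast; ring
    · rw [ih d c hd, hcard, if_neg (fun h => hc (hmod.mpr h))]; push_cast; ring

-- divisors of d with min k (d/k) ≥ i, bounded by m (for 1 ≤ d)
def divsFrom (d m i : Int) : Finset Int :=
  (intRange1 d).filter (fun k => PySem.Int.mod d k = 0 ∧ k ≤ m ∧ i ≤ k ∧ i ≤ d / k)

lemma mem_divsFrom {d m i k : Int} :
    k ∈ divsFrom d m i ↔ (1 ≤ k ∧ k ≤ d) ∧ k ∣ d ∧ k ≤ m ∧ i ≤ k ∧ i ≤ d / k := by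
  simp [divsFrom, Finset.mem_filter, mem_intRange1, PySem.Int.mod_eq_zero_iff_dvd, and_assoc]

lemma div_div_self_int {d k : Int} (hd : 0 < d) (hk : 0 < k) (hdvd : k ∣ d) : d / (d / k) = k := by
  obtain ⟨e, he⟩ := hdvd
  subst he
  have he : 0 < e := by nlinarith
  rw [Int.mul_ediv_cancel_left _ (by omega), Int.mul_ediv_cancel _ (by omega)]

lemma loopB_eq (d m : Int) (hd : 0 < d) : ∀ (fuel : Nat) (i c : Int), 0 < i →
    (d + 1 - i).toNat ≤ fuel →
    simpleCheckLoopB d m i c = c + (divsFrom d m i).card := by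
  intro fuel
  induction fuel with
  | zero =>
    intro i c hi hfuel
    have hdi : d < i := by omega
    have hgt : ¬ (i * i ≤ d) := by nlinarith
    rw [simpleCheckLoopB, dif_neg hgt]
    have : divsFrom d m i = ∅ := by
      rw [Finset.eq_empty_iff_forall_notMem]
      intro k hk
      rw [mem_divsFrom] at hk
      omega
    rw [this]; simp
  | succ n ih =>
    intro i c hi hfuel
    rw [simpleCheckLoopB]
    by_cases hle : i * i ≤ d
    · rw [dif_pos hle]
      have hid : i ≤ d := by nlinarith
      have hdi_pos : i ∣ d → 0 < d / i := fun h => by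
        have := (Int.le_ediv_iff_mul_le (by omega : (0:Int) < i)).mpr (by omega : 1 * i ≤ d)
        omega
      have hrec : ∀ c', simpleCheckLoopB d m (i+1) c' = c' + (divsFrom d m (i+1)).card :=
        fun c' => ih (i+1) c' (by omega) (by omega)
      have hmodiff : PySem.Int.mod d i = 0 ↔ i ∣ d := PySem.Int.mod_eq_zero_iff_dvd d i
      have hfd : PySem.Int.floordiv d i = d / i := PySem.Int.floordiv_eq_ediv_of_pos (by omega)
      have hset : divsFrom d m i = (divsFrom d m (i+1)) ∪
          ((Finset.Icc 1 d).filter (fun k => k ∣ d ∧ k ≤ m ∧ (k = i ∨ (i ∣ d ∧ k = d / i ∧ d / i ≠ i)))) := by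
        ext k
        rw [Finset.mem_union, mem_divsFrom, mem_divsFrom, Finset.mem_filter, Finset.mem_Icc]
        constructor
        · rintro ⟨hk, hdvd, hkm, hik, hidk⟩
          by_cases h1 : i + 1 ≤ k ∧ i + 1 ≤ d / k
          · exact Or.inl ⟨hk, hdvd, hkm, h1.1, h1.2⟩
          · right
            refine ⟨hk, hdvd, hkm, ?_⟩
            rcases (by omega : k = i ∨ d / k = i) with h | h
            · exact Or.inl h
            · have hk0 : 0 < k := by omega
              have hidvd : i ∣ d := ⟨k, by rw [← h]; exact (Int.ediv_mul_cancel hdvd).symm⟩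
              have hki : k = d / i := by rw [← h, div_div_self_int hd hk0 hdvd]
              by_cases heq : d / i = i
              · exact Or.inl (hki.trans heq)
              · exact Or.inr ⟨hidvd, hki, heq⟩
        · rintro (⟨hk, hdvd, hkm, hik, hidk⟩ | ⟨hk, hdvd, hkm, hcase⟩)
          · exact ⟨hk, hdvd, hkm, by omega, by omega⟩
          · have hile : i ≤ d / i := (Int.le_ediv_iff_mul_le (by omega : (0:Int) < i)).mpr hle
            refine ⟨hk, hdvd, hkm, ?_, ?_⟩
            · rcases hcase with rfl | ⟨hidvd, rfl, hne⟩
              · omega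
              · omega
            · rcases hcase with rfl | ⟨hidvd, rfl, hne⟩
              · exact hile
              · have := div_div_self_int hd (by omega : (0:Int) < i) hidvd
                omega
      have hdisj : Disjoint (divsFrom d m (i+1))
          ((Finset.Icc 1 d).filter (fun k => k ∣ d ∧ k ≤ m ∧ (k = i ∨ (i ∣ d ∧ k = d / i ∧ d / i ≠ i)))) := by
        rw [Finset.disjoint_left]
        intro k h1 h2
        rw [mem_divsFrom] at h1
        simp only [Finset.mem_filter, Finset.mem_Icc] at h2
        obtain ⟨⟨_, _⟩, _, _, hik, hidk⟩ := h1
        obtain ⟨_, _, _, hcase⟩ := h2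
        rcases hcase with rfl | ⟨hidvd, rfl, hne⟩
        · omega
        · have : d / (d / i) = i := div_div_self_int hd (by omega : (0:Int) < i) hidvd
          omega
      rw [hrec, hset, Finset.card_union_of_disjoint hdisj]
      by_cases hmod : PySem.Int.mod d i = 0
      · rw [if_pos hmod]
        have hidvd : i ∣ d := hmodiff.mp hmod
        have hdipos : 0 < d / i := hdi_pos hidvd
        have hdile : d / i ≤ d := Int.ediv_le_self _ (by omega)
        have hextra : ((Finset.Icc 1 d).filter (fun k => k ∣ d ∧ k ≤ m ∧ (k = i ∨ (i ∣ d ∧ k = d / i ∧ d / i ≠ i))))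
            = ((if i ≤ m then {i} else ∅) ∪ (if d / i ≠ i ∧ d / i ≤ m then {d / i} else ∅)) := by
          ext k
          simp only [Finset.mem_filter, Finset.mem_Icc, Finset.mem_union]
          constructor
          · rintro ⟨hk, hdvd, hkm, hcase⟩
            rcases hcase with rfl | ⟨_, rfl, hne⟩
            · left; rw [if_pos hkm]; simp
            · right; rw [if_pos ⟨hne, hkm⟩]; simp
          · intro h
            rcases h with h | h
            · by_cases hc : i ≤ m
              · rw [if_pos hc, Finset.mem_singleton] at h
                subst h
                exact ⟨⟨by omega, hid⟩, hidvd, hc, Or.inl rfl⟩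
              · rw [if_neg hc] at h; exact absurd h (Finset.notMem_empty k)
            · by_cases hc : d / i ≠ i ∧ d / i ≤ m
              · rw [if_pos hc, Finset.mem_singleton] at h
                subst h
                exact ⟨⟨by omega, hdile⟩, ⟨i, (Int.ediv_mul_cancel hidvd).symm⟩, hc.2, Or.inr ⟨hidvd, rfl, hc.1⟩⟩
              · rw [if_neg hc] at h; exact absurd h (Finset.notMem_empty k)
        rw [hextra]
        simp only [hfd]
        by_cases h1 : i ≤ m <;> by_cases h2 : d / i ≠ i ∧ d / i ≤ m
        · rw [if_pos h1, if_pos h1, if_pos h2, if_pos h2,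
              Finset.card_union_of_disjoint (Finset.disjoint_singleton.mpr (fun he => h2.1 he.symm)),
              Finset.card_singleton, Finset.card_singleton]
          push_cast; ring
        · rw [if_pos h1, if_pos h1, if_neg h2, if_neg h2, Finset.union_empty, Finset.card_singleton]
          push_cast; ring
        · rw [if_neg h1, if_neg h1, if_pos h2, if_pos h2, Finset.empty_union, Finset.card_singleton]
          push_cast; ring
        · rw [if_neg h1, if_neg h1, if_neg h2, if_neg h2, Finset.union_empty, Finset.card_empty]
          push_cast; ring
      · rw [if_neg hmod]
        have hnd : ¬ i ∣ d := fun h => hmod (hmodiff.mpr h)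
        have hempty : ((Finset.Icc 1 d).filter (fun k => k ∣ d ∧ k ≤ m ∧ (k = i ∨ (i ∣ d ∧ k = d / i ∧ d / i ≠ i)))) = ∅ := by
          rw [Finset.eq_empty_iff_forall_notMem]
          intro k hk
          simp only [Finset.mem_filter, Finset.mem_Icc] at hk
          obtain ⟨_, hdvd, _, hcase⟩ := hk
          rcases hcase with rfl | ⟨hidvd, _, _⟩
          · exact hnd hdvd
          · exact hnd hidvd
        rw [hempty]
        simp
    · rw [dif_neg hle]
      have hempty : divsFrom d m i = ∅ := by
        rw [Finset.eq_empty_iff_forall_notMem]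
        intro k hk
        rw [mem_divsFrom] at hk
        obtain ⟨⟨h1, h2⟩, hdvd, hkm, hik, hidk⟩ := hk
        have hkd : k * (d / k) = d := Int.mul_ediv_cancel' hdvd
        nlinarith
      rw [hempty]; simp

-- the two finsets coincide when 0 < d
lemma divs_sets_eq (d m : Int) (hd : 0 < d) (_hm : 0 < m) :
    divsUpTo d m = divsFrom d m 1 := by
  ext k
  rw [mem_divsUpTo, mem_divsFrom]
  constructor
  · rintro ⟨⟨h1, h2⟩, hdvd⟩
    have hkd : k ≤ d := Int.le_of_dvd hd hdvd
    have : (1:Int) ≤ d / k := (Int.le_ediv_iff_mul_le (by omega : (0:Int) < k)).mpr (by omega)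
    exact ⟨⟨h1, hkd⟩, hdvd, h2, h1, this⟩
  · rintro ⟨⟨h1, _⟩, hdvd, hkm, _, _⟩
    exact ⟨⟨h1, hkm⟩, hdvd⟩

lemma divsUpTo_zero (m : Int) (_hm : 0 ≤ m) : (divsUpTo 0 m).card = m.toNat := by
  unfold divsUpTo
  rw [Finset.filter_true_of_mem (fun k hk => by
    rw [PySem.Int.mod_eq_zero_iff_dvd]; exact dvd_zero k)]
  simp [intRange1]

-- A as a function of max/min
lemma simple_check_eq_loop (a b : Int) :
    simple_check a b = simpleCheckLoopA (max a b) (min a b) 0 := by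
  unfold simple_check
  split_ifs with h
  · rw [max_eq_left (by omega), min_eq_right (by omega)]
  · rw [max_eq_right (by omega), min_eq_left (by omega)]

-- ===== VERDICT (by name: the statement is the Claim_ definition above) =====
theorem simple_check_spec : Claim_equal_simple_check := by
  intro a b _
  unfold Spec_simple_check
  rw [simple_check_eq_loop]
  have hmin : (if a < b then a else b) = min a b := by rw [min_def]; split_ifs <;> omega
  have hdiff : (if a > b then a - b else b - a) = max a b - min a b := by
    rw [max_def, min_def]; split_ifs <;> omega
  simp only [simple_check_alt]
  rw [hmin, hdiff]
  by_cases h0 : min a b ≤ 0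
  · rw [if_pos h0, simpleCheckLoopA, dif_neg (by omega)]
  · rw [if_neg h0]
    have hm0 : 0 < min a b := by omega
    have hmM : min a b ≤ max a b := min_le_max
    have hA : simpleCheckLoopA (max a b) (min a b) 0
        = ((divsUpTo (max a b - min a b) (min a b)).card : Int) := by
      have h := loopA_eq (min a b).toNat (max a b - min a b) 0 (by omega)
      rw [Int.toNat_of_nonneg (by omega)] at h
      have e : min a b + (max a b - min a b) = max a b := by ring
      rw [e] at h
      rw [h, zero_add]
    by_cases hdz : max a b - min a b = 0
    · rw [if_pos hdz, hA, hdz, divsUpTo_zero _ (by omega)]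
      omega
    · rw [if_neg hdz, hA]
      have hdpos : 0 < max a b - min a b := by omega
      rw [loopB_eq _ _ hdpos (max a b - min a b).toNat 1 0 (by omega) (by omega), zero_add,
          divs_sets_eq _ _ hdpos hm0]
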